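-- pv_equiv track=rewrite | github.com/maximilianq/adventOfCode2021 | day10/day10.py | scoreB
-- ===== SOURCE A (Python) =====
-- def scoreB(_remaining):
--     total = 0
--     for i in range(len(_remaining)):
--         if _remaining[i] == ")":
--             total = (total * 5) + 1
--         elif _remaining[i] == "]":
--             total = (total * 5) + 2
--         elif _remaining[i] == "}":
--             total = (total * 5) + 3
--         else:
--             total = (total * 5) + 4
--     return total
-- ===== SOURCE B (Python) =====
-- def scoreB(_remaining):
--     values = {")": 1, "]": 2, "}": 3}
--     total = 0
--     power = 1
--     for c in reversed(_remaining):
--         total += values.get(c, 4) * power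
--         power *= 5
--     return total
-- ===== Notes on version B (the rewrite author's own statement) =====
-- stated objective: alternative
-- what changed: Replaces left-to-right Horner accumulation (if/elif chain, total*5+v) with a reverse pass that looks each character's value up in a dict (default 4) and adds value*power while maintaining the running power of 5.
import Mathlib
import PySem

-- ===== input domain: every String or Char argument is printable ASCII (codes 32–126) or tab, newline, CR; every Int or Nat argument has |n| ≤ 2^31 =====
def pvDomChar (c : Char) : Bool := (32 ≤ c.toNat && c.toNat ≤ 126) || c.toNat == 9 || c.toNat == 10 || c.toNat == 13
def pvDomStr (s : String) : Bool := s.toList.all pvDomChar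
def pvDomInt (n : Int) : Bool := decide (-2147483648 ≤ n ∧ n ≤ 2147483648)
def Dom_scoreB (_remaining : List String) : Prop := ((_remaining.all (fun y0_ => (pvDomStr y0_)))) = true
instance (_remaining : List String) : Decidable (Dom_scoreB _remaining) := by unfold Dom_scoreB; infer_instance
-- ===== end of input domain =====

-- B replaces A's left-to-right Horner accumulation with a reverse pass using a
-- dict value lookup (default 4) and an explicit running power of 5 (objective: alternative).


-- ===== PORT A =====
-- loop over the elements in order, Horner step with the if/elif chain in source order
def scoreB (_remaining : List String) : Int :=
  _remaining.foldl
    (fun total c =>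
      if c = ")" then total * 5 + 1
      else if c = "]" then total * 5 + 2
      else if c = "}" then total * 5 + 3
      else total * 5 + 4)
    0

-- ===== PORT B =====
-- dict {')':1, ']':2, '}':3}; reverse pass carrying (total, power)
def scoreBValues : PySem.Dict String Int :=
  PySem.Dict.ofList [(")", 1), ("]", 2), ("}", 3)]

-- values.get(c, 4)
def scoreBv (c : String) : Int := scoreBValues.getD c 4

def scoreB_alt (_remaining : List String) : Int :=
  (_remaining.reverse.foldl
    (fun (st : Int × Int) c => (st.1 + scoreBv c * st.2, st.2 * 5))
    (0, 1)).1

-- ===== PRECONDITION & SPEC =====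
def Spec_scoreB (_remaining : List String) (out : Int) : Prop := out = scoreB_alt _remaining
instance (_remaining : List String) (out : Int) : Decidable (Spec_scoreB _remaining out) := by unfold Spec_scoreB; infer_instance

-- ===== CLAIM (what is proved, stated in full; the proofs are below) =====
def Claim_equal_scoreB : Prop := ∀ (_remaining : List String), Dom_scoreB _remaining → Spec_scoreB _remaining (scoreB _remaining)

-- ===== LEMMAS AND PROOFS =====

-- A's if/elif chain and B's dict lookup give the same value per element
theorem scoreB_val_eq (c : String) :
    scoreBv c =
      (if c = ")" then (1 : Int) else if c = "]" then 2 else if c = "}" then 3 else 4) := by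
  by_cases h1 : c = ")"
  · subst h1; rfl
  by_cases h2 : c = "]"
  · subst h2; rfl
  by_cases h3 : c = "}"
  · subst h3; rfl
  have e1 : ((")" : String) == c) = false := beq_eq_false_iff_ne.mpr (Ne.symm h1)
  have e2 : (("]" : String) == c) = false := beq_eq_false_iff_ne.mpr (Ne.symm h2)
  have e3 : (("}" : String) == c) = false := beq_eq_false_iff_ne.mpr (Ne.symm h3)
  simp [scoreBv, scoreBValues, PySem.Dict.getD, PySem.Dict.ofList, PySem.Dict.get?,
    PySem.Dict.update, PySem.Dict.insert, PySem.Dict.empty, List.find?, e1, e2, e3, h1, h2, h3]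

-- B's fold from an arbitrary state
theorem scoreB_alt_fold (ys : List String) (t p : Int) :
    (ys.foldl (fun (st : Int × Int) c => (st.1 + scoreBv c * st.2, st.2 * 5)) (t, p)).1
      = t + p * (ys.foldl (fun (st : Int × Int) c => (st.1 + scoreBv c * st.2, st.2 * 5)) (0, 1)).1 := by
  induction ys generalizing t p with
  | nil => simp
  | cons c ys ih =>
    simp only [List.foldl_cons]
    rw [ih, ih (0 + scoreBv c * 1)]
    ring

-- appending one element on the right adds its value times 5^|ys| (B's form, start state (0,1))
theorem scoreB_alt_append (ys : List String) (c : String) :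
    ((ys ++ [c]).foldl (fun (st : Int × Int) d => (st.1 + scoreBv d * st.2, st.2 * 5)) (0, 1)).1
      = (ys.foldl (fun (st : Int × Int) d => (st.1 + scoreBv d * st.2, st.2 * 5)) (0, 1)).1
        + scoreBv c * 5 ^ ys.length := by
  induction ys with
  | nil => simp
  | cons d ys ih =>
    simp only [List.cons_append, List.foldl_cons]
    rw [scoreB_alt_fold, scoreB_alt_fold _ (0 + scoreBv d * 1), ih]
    push_cast [List.length_cons]
    ring

-- A's Horner fold, rewritten with scoreBv
theorem scoreB_eq_v (xs : List String) :
    scoreB xs = xs.foldl (fun total c => total * 5 + scoreBv c) 0 := by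
  unfold scoreB
  congr 1
  funext total c
  rw [scoreB_val_eq]
  split_ifs <;> rfl

-- A's fold from arbitrary accumulator
theorem scoreB_fold (xs : List String) (t : Int) :
    xs.foldl (fun total c => total * 5 + scoreBv c) t
      = t * 5 ^ xs.length + xs.foldl (fun total c => total * 5 + scoreBv c) 0 := by
  induction xs generalizing t with
  | nil => simp
  | cons c xs ih =>
    simp only [List.foldl_cons, List.length_cons]
    rw [ih, ih (0 * 5 + scoreBv c)]
    push_cast
    ring

theorem scoreB_eq_alt (xs : List String) : scoreB xs = scoreB_alt xs := by
  rw [scoreB_eq_v]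
  induction xs with
  | nil => rfl
  | cons c xs ih =>
    unfold scoreB_alt
    simp only [List.reverse_cons, List.foldl_cons]
    rw [scoreB_alt_append, scoreB_fold, ih]
    unfold scoreB_alt
    simp only [List.length_reverse]
    ring

-- ===== VERDICT (by name: the statement is the Claim_ definition above) =====
theorem scoreB_spec : Claim_equal_scoreB := by
  intro xs _
  unfold Spec_scoreB
  exact scoreB_eq_alt xs
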